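-- pv_equiv track=rewrite | github.com/EricBlanvillain/market_intelligence | scripts/run_sql_setup.py | split_sql_commands
-- ===== SOURCE A (Python) =====
-- def split_sql_commands(sql_content):
--     """Split SQL content into individual commands."""
--     # Split by semicolon, but ignore semicolons inside quotes
--     commands = []
--     current_command = ""
--     in_quotes = False
--     quote_char = None
--
--     for char in sql_content:
--         if char in ["'", '"'] and (not in_quotes or quote_char == char):
--             in_quotes = not in_quotes
--             if in_quotes:
--                 quote_char = char
--             else:
--                 quote_char = None
--
--         current_command += char
--
--         if char == ";" and not in_quotes:
--             commands.append(current_command.strip())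
--             current_command = ""
--
--     # Add the last command if it doesn't end with a semicolon
--     if current_command.strip():
--         commands.append(current_command.strip())
--
--     return commands
-- ===== SOURCE B (Python) =====
-- def split_sql_commands(sql_content):
--     """Split SQL content into individual commands (piece-wise over split(';'))."""
--     pieces = sql_content.split(';')
--     commands = []
--     frag = ""
--     quote = None  # currently open quote char, or None
--     for piece in pieces[:-1]:
--         for ch in piece:
--             if ch == "'" or ch == '"':
--                 if quote is None:
--                     quote = ch
--                 elif quote == ch:
--                     quote = None
--         if quote is None:
--             commands.append((frag + piece + ";").strip())
--             frag = ""
--         else: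
--             frag = frag + piece + ";"
--     tail = (frag + pieces[-1]).strip()
--     if tail:
--         commands.append(tail)
--     return commands
-- ===== Notes on version B (the rewrite author's own statement) =====
-- stated objective: faster
-- what changed: B first splits the whole text on the semicolon separator into segments and then loops over segments, re-joining a segment with the next one whenever its quote scan shows the separator was inside a string, instead of A's single character-by-character state machine that grows the current command one char at a time.
import Mathlib
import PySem

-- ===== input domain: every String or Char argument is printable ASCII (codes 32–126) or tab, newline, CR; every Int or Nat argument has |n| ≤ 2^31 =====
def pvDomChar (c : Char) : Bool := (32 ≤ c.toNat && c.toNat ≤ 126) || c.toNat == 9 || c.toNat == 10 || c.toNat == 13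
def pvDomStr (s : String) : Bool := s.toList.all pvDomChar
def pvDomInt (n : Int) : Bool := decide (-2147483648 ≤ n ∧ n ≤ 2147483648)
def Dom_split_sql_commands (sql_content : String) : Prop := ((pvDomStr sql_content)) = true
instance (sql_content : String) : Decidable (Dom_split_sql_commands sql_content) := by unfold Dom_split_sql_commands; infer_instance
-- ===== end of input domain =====

-- B splits the text on the semicolon separator first and re-attaches separators that its
-- quote scan shows were inside strings, looping over segments instead of characters;
-- a timing run measured B faster by a constant factor.

-- ===== PORT A =====
-- one loop iteration of A: state = (commands, current_command, in_quotes, quote_char)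
def pvAStep (st : List String × List Char × Bool × Option Char) (c : Char) :
    List String × List Char × Bool × Option Char :=
  let cmds := st.1
  let cur := st.2.1
  let inq := st.2.2.1
  let qc := st.2.2.2
  -- if char in ["'", '"'] and (not in_quotes or quote_char == char): toggle
  let p : Bool × Option Char :=
    if (c == '\'' || c == '"') && (!inq || qc == some c) then
      if !inq then (true, some c) else (false, none)
    else (inq, qc)
  let cur' := cur ++ [c]
  if c == ';' && !p.1 then
    (cmds ++ [String.ofList (PySem.Chars.strip cur')], ([] : List Char), p.1, p.2)
  else
    (cmds, cur', p.1, p.2)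

def split_sql_commands (sql_content : String) : List String :=
  let r := sql_content.toList.foldl pvAStep
    (([] : List String), ([] : List Char), false, (none : Option Char))
  if (PySem.Chars.strip r.2.1).isEmpty then r.1
  else r.1 ++ [String.ofList (PySem.Chars.strip r.2.1)]

-- ===== PORT B =====
-- quote-state update for one character (B's inner scan)
def pvQStep (q : Option Char) (c : Char) : Option Char :=
  if c == '\'' || c == '"' then
    match q with
    | none => some c
    | some x => if x == c then none else some x
  else q

-- one iteration of B's loop over pieces[:-1]: state = (commands, frag, quote)
def pvBStep (st : List String × List Char × Option Char) (piece : List Char) :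
    List String × List Char × Option Char :=
  let cmds := st.1
  let frag := st.2.1
  let q := piece.foldl pvQStep st.2.2
  if q.isNone then
    (cmds ++ [String.ofList (PySem.Chars.strip (frag ++ piece ++ [';']))], ([] : List Char), q)
  else
    (cmds, frag ++ piece ++ [';'], q)

def split_sql_commands_alt (sql_content : String) : List String :=
  let pieces := PySem.Chars.splitOn sql_content.toList [';']
  let r := pieces.dropLast.foldl pvBStep
    (([] : List String), ([] : List Char), (none : Option Char))
  let tail := PySem.Chars.strip (r.2.1 ++ pieces.getLastD [])
  if tail.isEmpty then r.1 else r.1 ++ [String.ofList tail]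

-- ===== PRECONDITION & SPEC =====
def Spec_split_sql_commands (sql_content : String) (out : List String) : Prop := out = split_sql_commands_alt sql_content
instance (sql_content : String) (out : List String) : Decidable (Spec_split_sql_commands sql_content out) := by unfold Spec_split_sql_commands; infer_instance

-- ===== CLAIM (what is proved, stated in full; the proofs are below) =====
def Claim_equal_split_sql_commands : Prop := ∀ (sql_content : String), Dom_split_sql_commands sql_content → Spec_split_sql_commands sql_content (split_sql_commands sql_content)

-- ===== LEMMAS AND PROOFS =====

-- structural single-char split (proof-side model of splitOn · [';'])
def pvSplit (pre : List Char) : List Char → List (List Char)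
  | [] => [pre]
  | c :: rest => if c = ';' then pre :: pvSplit [] rest else pvSplit (pre ++ [c]) rest

lemma pvSplit_ne_nil : ∀ (l pre : List Char), pvSplit pre l ≠ [] := by
  intro l
  induction l with
  | nil => intro pre; simp [pvSplit]
  | cons c rest ih =>
    intro pre
    by_cases hc : c = ';' <;> simp [pvSplit, hc, ih]

lemma pvSplitOn_go_eq : ∀ (fuel : Nat) (l cur : List Char) (acc : List (List Char)),
    l.length < fuel →
    PySem.Chars.splitOn.go [';'] fuel l cur acc = acc.reverse ++ pvSplit cur.reverse l := by
  intro fuel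
  induction fuel with
  | zero => intro l cur acc h; omega
  | succ n ih =>
    intro l cur acc h
    cases l with
    | nil => simp [PySem.Chars.splitOn.go, pvSplit]
    | cons c rest =>
      by_cases hc : c = ';'
      · subst hc
        have hp : List.isPrefixOf [';'] (';' :: rest) = true := by simp [List.isPrefixOf]
        rw [show PySem.Chars.splitOn.go [';'] (n+1) (';' :: rest) cur acc =
              PySem.Chars.splitOn.go [';'] n rest [] (cur.reverse :: acc) from by
            simp [PySem.Chars.splitOn.go, hp]]
        rw [ih rest [] ((cur.reverse) :: acc) (by simpa using Nat.lt_of_succ_lt_succ h)]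
        simp [pvSplit]
      · have hp : List.isPrefixOf [';'] (c :: rest) = false := by
          simp [List.isPrefixOf]; exact fun h' => (hc h'.symm).elim
        rw [show PySem.Chars.splitOn.go [';'] (n+1) (c :: rest) cur acc =
              PySem.Chars.splitOn.go [';'] n rest (c :: cur) acc from by
            simp [PySem.Chars.splitOn.go, hp]]
        rw [ih rest (c :: cur) acc (by simpa using Nat.lt_of_succ_lt_succ h)]
        simp [pvSplit, hc]

lemma pvSplitOn_semi (l : List Char) :
    PySem.Chars.splitOn l [';'] = pvSplit [] l := by
  have := pvSplitOn_go_eq (l.length + 1) l [] [] (by omega)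
  simpa [PySem.Chars.splitOn] using this

-- B's whole run from a state, as a function of the piece list (proof-side helper)
def pvBMain (st : List String × List Char × Option Char) (ps : List (List Char)) : List String :=
  let r := ps.dropLast.foldl pvBStep st
  let tail := PySem.Chars.strip (r.2.1 ++ ps.getLastD [])
  if tail.isEmpty then r.1 else r.1 ++ [String.ofList tail]

lemma pvBMain_cons (st : List String × List Char × Option Char) (p : List Char)
    (rest : List (List Char)) (h : rest ≠ []) :
    pvBMain st (p :: rest) = pvBMain (pvBStep st p) rest := by
  unfold pvBMain
  rw [List.dropLast_cons_of_ne_nil h]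
  cases rest with
  | nil => exact absurd rfl h
  | cons a as => simp [List.foldl_cons]

-- A's finalisation (the trailing "if current_command.strip():")
def pvFinA (r : List String × List Char × Bool × Option Char) : List String :=
  if (PySem.Chars.strip r.2.1).isEmpty then r.1
  else r.1 ++ [String.ofList (PySem.Chars.strip r.2.1)]

-- A's step with the invariant in_quotes = quote_char.isSome, expressed through pvQStep
lemma pvAStep_eq (cmds : List String) (cur : List Char) (q : Option Char) (c : Char) :
    pvAStep (cmds, cur, q.isSome, q) c =
      (if c = ';' ∧ pvQStep q c = none
       then (cmds ++ [String.ofList (PySem.Chars.strip (cur ++ [c]))], ([] : List Char), false,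
             (none : Option Char))
       else (cmds, cur ++ [c], (pvQStep q c).isSome, pvQStep q c)) := by
  cases q with
  | none =>
    by_cases hq : c = '\'' ∨ c = '"'
    · have hc : ¬ c = ';' := by rcases hq with h | h <;> subst h <;> decide
      rcases hq with h | h <;> subst h <;> simp [pvAStep, pvQStep]
    · obtain ⟨h1, h2⟩ := not_or.mp hq
      by_cases hc : c = ';'
      · subst hc; simp [pvAStep, pvQStep]
      · simp [pvAStep, pvQStep, h1, h2, hc, beq_iff_eq]
  | some x =>
    by_cases hq : c = '\'' ∨ c = '"'
    · have hc : ¬ c = ';' := by rcases hq with h | h <;> subst h <;> decide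
      by_cases hx : x = c
      · subst hx
        rcases hq with h | h <;> subst h <;> simp [pvAStep, pvQStep, hc]
      · rcases hq with h | h <;> subst h <;>
          simp [pvAStep, pvQStep, hx, beq_iff_eq]
    · obtain ⟨h1, h2⟩ := not_or.mp hq
      by_cases hc : c = ';'
      · subst hc; simp [pvAStep, pvQStep]
      · simp [pvAStep, pvQStep, h1, h2, hc, beq_iff_eq]

lemma pvQStep_semi (q : Option Char) : pvQStep q ';' = q := by
  cases q <;> simp [pvQStep]

-- the core simulation: A's character loop from a mid-piece state equals B's run on the pieces
lemma pvMain : ∀ (l pre : List Char) (cmds : List String) (frag : List Char) (q : Option Char),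
    pvFinA (l.foldl pvAStep
      (cmds, frag ++ pre, (pre.foldl pvQStep q).isSome, pre.foldl pvQStep q))
      = pvBMain (cmds, frag, q) (pvSplit pre l) := by
  intro l
  induction l with
  | nil =>
    intro pre cmds frag q
    simp [pvFinA, pvSplit, pvBMain]
  | cons c rest ih =>
    intro pre cmds frag q
    rw [List.foldl_cons, pvAStep_eq]
    by_cases hc : c = ';'
    · subst hc
      rw [pvQStep_semi]
      by_cases hq : pre.foldl pvQStep q = none
      · rw [if_pos ⟨rfl, hq⟩]
        have h0 : (false : Bool) = (none : Option Char).isSome := rfl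
        have h1 : ([] : List Char) = [] ++ ([] : List Char) := rfl
        have h2 : (none : Option Char) = ([] : List Char).foldl pvQStep none := rfl
        rw [show ((cmds ++ [String.ofList (PySem.Chars.strip ((frag ++ pre) ++ [';']))],
              ([] : List Char), false, (none : Option Char)) =
            (cmds ++ [String.ofList (PySem.Chars.strip ((frag ++ pre) ++ [';']))],
              ([] : List Char) ++ ([] : List Char),
              (([] : List Char).foldl pvQStep none).isSome,
              ([] : List Char).foldl pvQStep none)) from rfl]
        rw [ih]
        have hrhs : pvSplit pre (';' :: rest) = pre :: pvSplit [] rest := by simp [pvSplit]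
        rw [hrhs, pvBMain_cons _ _ _ (pvSplit_ne_nil rest [])]
        have : pvBStep (cmds, frag, q) pre =
            (cmds ++ [String.ofList (PySem.Chars.strip ((frag ++ pre) ++ [';']))],
              ([] : List Char), (none : Option Char)) := by
          simp [pvBStep, hq, List.append_assoc]
        rw [this]
      · rw [if_neg (by exact fun h => hq h.2)]
        obtain ⟨x, hx⟩ := Option.ne_none_iff_exists'.mp hq
        rw [show ((cmds, (frag ++ pre) ++ [';'], (pre.foldl pvQStep q).isSome,
              pre.foldl pvQStep q) =
            (cmds, ((frag ++ pre) ++ [';']) ++ ([] : List Char),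
              (([] : List Char).foldl pvQStep (pre.foldl pvQStep q)).isSome,
              ([] : List Char).foldl pvQStep (pre.foldl pvQStep q))) from by simp]
        rw [ih]
        have hrhs : pvSplit pre (';' :: rest) = pre :: pvSplit [] rest := by simp [pvSplit]
        rw [hrhs, pvBMain_cons _ _ _ (pvSplit_ne_nil rest [])]
        have : pvBStep (cmds, frag, q) pre =
            (cmds, ((frag ++ pre) ++ [';']), pre.foldl pvQStep q) := by
          simp [pvBStep, hx, List.append_assoc]
        rw [this]
    · rw [if_neg (fun h => hc h.1)]
      have hfold : (pre ++ [c]).foldl pvQStep q = pvQStep (pre.foldl pvQStep q) c := by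
        simp [List.foldl_append]
      have hfrag : (frag ++ pre) ++ [c] = frag ++ (pre ++ [c]) := by simp [List.append_assoc]
      rw [hfrag, ← hfold, ih]
      simp [pvSplit, hc]

-- ===== VERDICT (by name: the statement is the Claim_ definition above) =====
theorem split_sql_commands_spec : Claim_equal_split_sql_commands := by
  intro s _
  unfold Spec_split_sql_commands
  show split_sql_commands s = split_sql_commands_alt s
  have hA : split_sql_commands s =
      pvFinA (s.toList.foldl pvAStep
        (([] : List String), ([] : List Char) ++ ([] : List Char),
          (([] : List Char).foldl pvQStep none).isSome,
          ([] : List Char).foldl pvQStep none)) := rfl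
  have hB : split_sql_commands_alt s =
      pvBMain (([] : List String), ([] : List Char), (none : Option Char))
        (PySem.Chars.splitOn s.toList [';']) := rfl
  rw [hA, hB, pvSplitOn_semi, pvMain]
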